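-- pv_equiv track=rewrite | github.com/devcybiko/cybiko-fun | gpio_uart.py | split_durations_by_long_idle
-- ===== SOURCE A (Python) =====
-- def split_durations_by_long_idle(durations, baud=38400, threshold_bits=32):
--     """
--     Splits the list of (level, duration) tuples into arrays of (level, duration) tuples, separated by long durations (idle).
--     Returns a list of duration-lists (each a list of (level, duration)).
--     threshold_bits: number of bits (at baud rate) to consider a 'long' duration (default: 32 bits)
--     """
--     BIT_US = int(1_000_000 / baud)
--     threshold_us = threshold_bits * BIT_US
--     streams = []
--     current = []
--     for level, dur in durations:
--         if dur >= threshold_us: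
--             if current:
--                 streams.append(current)
--                 current = []
--             continue
--         current.append((level, dur))
--     if current:
--         streams.append(current)
--     return streams
-- ===== SOURCE B (Python) =====
-- def split_durations_by_long_idle(durations, baud=38400, threshold_bits=32):
--     """Two-pointer re-implementation: scan an index over the list; for each run of
--     short durations find its end in an inner scan and slice it out, instead of
--     maintaining a 'current' buffer with flush logic."""
--     BIT_US = int(1_000_000 / baud)
--     threshold_us = threshold_bits * BIT_US
--     streams = []
--     i = 0
--     n = len(durations)
--     while i < n:
--         if durations[i][1] >= threshold_us:
--             i += 1
--         else:
--             j = i + 1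
--             while j < n and durations[j][1] < threshold_us:
--                 j += 1
--             streams.append(durations[i:j])
--             i = j
--     return streams
-- ===== Notes on version B (the rewrite author's own statement) =====
-- stated objective: alternative
-- what changed: Replaced A's single pass with a mutable 'current' buffer and flush-on-long/flush-at-end logic by a two-pointer scan that finds each maximal run of short durations by index and slices it out directly.
import Mathlib
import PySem

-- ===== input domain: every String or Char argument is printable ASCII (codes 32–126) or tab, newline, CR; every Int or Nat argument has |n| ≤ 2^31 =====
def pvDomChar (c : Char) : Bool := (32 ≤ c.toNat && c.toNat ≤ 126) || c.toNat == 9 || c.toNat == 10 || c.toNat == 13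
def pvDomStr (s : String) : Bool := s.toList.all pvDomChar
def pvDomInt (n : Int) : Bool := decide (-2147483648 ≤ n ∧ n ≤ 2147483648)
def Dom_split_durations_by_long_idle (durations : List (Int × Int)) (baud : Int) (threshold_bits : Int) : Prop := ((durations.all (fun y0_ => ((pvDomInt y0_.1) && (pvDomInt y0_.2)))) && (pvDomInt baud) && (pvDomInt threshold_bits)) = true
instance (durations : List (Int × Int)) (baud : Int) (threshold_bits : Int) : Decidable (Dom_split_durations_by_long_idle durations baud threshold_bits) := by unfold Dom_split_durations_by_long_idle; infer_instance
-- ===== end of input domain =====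

-- B replaces A's current-buffer-with-flush pass by a two-pointer scan slicing out
-- each maximal run of short durations (objective: alternative, same cost).

-- ===== PORT A =====
-- int(1_000_000 / baud): on |baud| ≤ 2^31 the float quotient never rounds across
-- an integer boundary, so int() of it equals exact truncating division Int.tdiv.
def split_durations_by_long_idle (durations : List (Int × Int)) (baud : Int) (threshold_bits : Int) : List (List (Int × Int)) :=
  let BIT_US : Int := Int.tdiv 1000000 baud
  let threshold_us := threshold_bits * BIT_US
  let r := durations.foldl
    (fun (st : List (List (Int × Int)) × List (Int × Int)) ld =>
      if ld.2 ≥ threshold_us then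
        if st.2 ≠ [] then (st.1 ++ [st.2], []) else st
      else
        (st.1, st.2 ++ [(ld.1, ld.2)]))
    ([], [])
  if r.2 ≠ [] then r.1 ++ [r.2] else r.1

-- ===== PORT B =====
-- inner loop: 'while j < n and durations[j][1] < threshold_us: j += 1'
-- (fuel = n - j, the exact bound on the remaining iterations; it only makes the loop total)
def pvAltScan (xs : List (Int × Int)) (t : Int) (n : Nat) : Nat → Nat → Nat
  | 0, j => j
  | fuel + 1, j => if j < n ∧ (xs.getD j (0, 0)).2 < t then pvAltScan xs t n fuel (j + 1) else j

-- outer 'while i < n' loop (fuel = n - i, again only a totality bound: i strictly increases)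
def pvAltLoop (xs : List (Int × Int)) (t : Int) (n : Nat) : Nat → Nat → List (List (Int × Int)) → List (List (Int × Int))
  | 0, _, streams => streams
  | fuel + 1, i, streams =>
    if i < n then
      if (xs.getD i (0, 0)).2 ≥ t then
        pvAltLoop xs t n fuel (i + 1) streams
      else
        let j := pvAltScan xs t n (n - (i + 1)) (i + 1)
        pvAltLoop xs t n fuel j (streams ++ [PySem.List.slice xs (some (i : Int)) (some (j : Int))])
    else streams

def split_durations_by_long_idle_alt (durations : List (Int × Int)) (baud : Int) (threshold_bits : Int) : List (List (Int × Int)) :=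
  let BIT_US : Int := Int.tdiv 1000000 baud
  let threshold_us := threshold_bits * BIT_US
  pvAltLoop durations threshold_us durations.length durations.length 0 []

-- ===== PRECONDITION & SPEC =====
-- Python A raises ZeroDivisionError when baud == 0 (and so does B); only that is excluded.
def Pre_split_durations_by_long_idle (durations : List (Int × Int)) (baud : Int) (threshold_bits : Int) : Prop := baud ≠ 0
instance (durations : List (Int × Int)) (baud : Int) (threshold_bits : Int) : Decidable (Pre_split_durations_by_long_idle durations baud threshold_bits) := by unfold Pre_split_durations_by_long_idle; infer_instance
def pvWitness_split_durations_by_long_idle : (List (Int × Int)) × Int × Int := ([(0, 5), (1, 900), (0, 3)], 38400, 32)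

def Spec_split_durations_by_long_idle (durations : List (Int × Int)) (baud : Int) (threshold_bits : Int) (out : List (List (Int × Int))) : Prop := out = split_durations_by_long_idle_alt durations baud threshold_bits
instance (durations : List (Int × Int)) (baud : Int) (threshold_bits : Int) (out : List (List (Int × Int))) : Decidable (Spec_split_durations_by_long_idle durations baud threshold_bits out) := by unfold Spec_split_durations_by_long_idle; infer_instance

-- ===== CLAIM (what is proved, stated in full; the proofs are below) =====
def Claim_equal_split_durations_by_long_idle : Prop := ∀ (durations : List (Int × Int)) (baud : Int) (threshold_bits : Int), Dom_split_durations_by_long_idle durations baud threshold_bits → Pre_split_durations_by_long_idle durations baud threshold_bits → Spec_split_durations_by_long_idle durations baud threshold_bits (split_durations_by_long_idle durations baud threshold_bits)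

-- ===== LEMMAS AND PROOFS =====

-- canonical chunking both ports are proved equal to
def pvChunks (t : Int) : List (Int × Int) → List (List (Int × Int))
  | [] => []
  | p :: xs =>
    if t ≤ p.2 then pvChunks t xs
    else (p :: xs.takeWhile (fun q => decide (q.2 < t))) :: pvChunks t (xs.dropWhile (fun q => decide (q.2 < t)))
termination_by l => l.length
decreasing_by
  · simp
  · have := List.length_dropWhile_le (p := fun q : Int × Int => decide (q.2 < t)) (l := xs)
    simp; omega

theorem pv_take_takeWhile {α : Type} (p : α → Bool) (l : List α) :
    l.take (l.takeWhile p).length = l.takeWhile p := by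
  induction l with
  | nil => simp
  | cons a l ih =>
    by_cases h : p a
    · simp [List.takeWhile_cons, h, ih]
    · simp [List.takeWhile_cons, h]

theorem pv_drop_takeWhile {α : Type} (p : α → Bool) (l : List α) :
    l.drop (l.takeWhile p).length = l.dropWhile p := by
  induction l with
  | nil => simp
  | cons a l ih =>
    by_cases h : p a
    · simp [List.takeWhile_cons, List.dropWhile_cons, h, ih]
    · simp [List.takeWhile_cons, List.dropWhile_cons, h]

theorem pv_getD_drop (xs : List (Int × Int)) (j : Nat) (hj : j < xs.length) :
    xs.drop j = xs.getD j (0, 0) :: xs.drop (j + 1) := by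
  rw [List.getD_eq_getElem?_getD, List.getElem?_eq_getElem hj]
  simpa using (List.drop_eq_getElem_cons hj).symm

theorem pvAltScan_eq (xs : List (Int × Int)) (t : Int) : ∀ (fuel j : Nat), xs.length - j ≤ fuel →
    pvAltScan xs t xs.length fuel j = j + ((xs.drop j).takeWhile (fun q => decide (q.2 < t))).length := by
  intro fuel
  induction fuel with
  | zero =>
    intro j hfuel
    rw [pvAltScan, List.drop_eq_nil_of_le (by omega)]
    simp
  | succ fuel ih =>
    intro j hfuel
    rw [pvAltScan]
    split
    · rename_i h
      obtain ⟨hj, hp⟩ := h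
      rw [ih (j + 1) (by omega), pv_getD_drop xs j hj, List.takeWhile_cons,
        if_pos (by simpa using hp), List.length_cons]
      omega
    · rename_i h
      rcases Nat.lt_or_ge j xs.length with hj | hj
      · have hp : ¬ (xs.getD j (0, 0)).2 < t := by tauto
        rw [pv_getD_drop xs j hj, List.takeWhile_cons, if_neg (by simpa using hp)]
        simp
      · rw [List.drop_eq_nil_of_le hj]
        simp

theorem pvAltLoop_eq (xs : List (Int × Int)) (t : Int) : ∀ (fuel i : Nat) (streams : List (List (Int × Int))), xs.length - i ≤ fuel →
    pvAltLoop xs t xs.length fuel i streams = streams ++ pvChunks t (xs.drop i) := by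
  intro fuel
  induction fuel with
  | zero =>
    intro i streams hfuel
    rw [pvAltLoop, List.drop_eq_nil_of_le (by omega)]
    simp [pvChunks]
  | succ fuel ih =>
    intro i streams hfuel
    rw [pvAltLoop]
    split
    · rename_i hi
      split
      · rename_i hge
        rw [ih (i + 1) streams (by omega), pv_getD_drop xs i hi, pvChunks,
          if_pos (by omega : t ≤ (xs.getD i (0, 0)).2)]
      · rename_i hlt
        have hp : (xs.getD i (0, 0)).2 < t := by omega
        have h2 : List.dropWhile (fun q : Int × Int => decide (q.2 < t)) (xs.drop (i + 1))
            = xs.drop (i + 1 + ((xs.drop (i + 1)).takeWhile (fun q => decide (q.2 < t))).length) := by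
          rw [← pv_drop_takeWhile, List.drop_drop]
        rw [pvAltScan_eq xs t (xs.length - (i + 1)) (i + 1) (by omega)]
        rw [ih _ _ (by omega)]
        rw [PySem.List.slice_natCast]
        rw [show (i + 1 + ((xs.drop (i + 1)).takeWhile (fun q => decide (q.2 < t))).length) - i
            = ((xs.drop (i + 1)).takeWhile (fun q => decide (q.2 < t))).length + 1 from by omega]
        rw [← h2, pv_getD_drop xs i hi, List.take_succ_cons, pv_take_takeWhile]
        rw [pvChunks, if_neg (by omega : ¬ t ≤ (xs.getD i (0, 0)).2)]
        simp
    · rename_i hi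
      rw [List.drop_eq_nil_of_le (by omega)]
      simp [pvChunks]

-- A's fold step, named for the proof (definitionally equal to the lambda in port A)
def pvFA (t : Int) (st : List (List (Int × Int)) × List (Int × Int)) (ld : Int × Int) :
    List (List (Int × Int)) × List (Int × Int) :=
  if ld.2 ≥ t then
    if st.2 ≠ [] then (st.1 ++ [st.2], []) else st
  else
    (st.1, st.2 ++ [(ld.1, ld.2)])

-- A's pending buffer, folded into the canonical chunking
def pvChunksP (t : Int) (cur xs : List (Int × Int)) : List (List (Int × Int)) :=
  if cur = [] then pvChunks t xs
  else (cur ++ xs.takeWhile (fun q => decide (q.2 < t))) :: pvChunks t (xs.dropWhile (fun q => decide (q.2 < t)))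

theorem pvFoldA_eq (t : Int) (xs : List (Int × Int)) : ∀ (streams : List (List (Int × Int))) (cur : List (Int × Int)),
    (if (List.foldl (pvFA t) (streams, cur) xs).2 ≠ [] then
        (List.foldl (pvFA t) (streams, cur) xs).1 ++ [(List.foldl (pvFA t) (streams, cur) xs).2]
      else (List.foldl (pvFA t) (streams, cur) xs).1) = streams ++ pvChunksP t cur xs := by
  induction xs with
  | nil =>
    intro streams cur
    by_cases hc : cur = [] <;> simp [pvChunksP, hc, pvChunks]
  | cons p rest ih =>
    intro streams cur
    simp only [List.foldl_cons]
    by_cases hge : p.2 ≥ t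
    · by_cases hc : cur = []
      · have hf : pvFA t (streams, cur) p = (streams, cur) := by
          simp [pvFA, hge, hc]
        rw [hf, ih streams cur]
        simp [pvChunksP, hc, pvChunks, hge]
      · have hf : pvFA t (streams, cur) p = (streams ++ [cur], []) := by
          simp [pvFA, hge, hc]
        rw [hf, ih (streams ++ [cur]) []]
        simp [pvChunksP, hc, pvChunks, hge, List.takeWhile_cons, List.dropWhile_cons, not_lt.mpr hge]
    · have hlt : p.2 < t := by omega
      have hf : pvFA t (streams, cur) p = (streams, cur ++ [p]) := by
        simp [pvFA, hge]
      rw [hf, ih streams (cur ++ [p])]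
      by_cases hc : cur = [] <;>
        simp [pvChunksP, hc, pvChunks, List.takeWhile_cons, List.dropWhile_cons, hlt, not_le.mpr hlt]

-- ===== VERDICT (by name: the statement is the Claim_ definition above) =====
theorem split_durations_by_long_idle_spec : Claim_equal_split_durations_by_long_idle := by
  intro durations baud threshold_bits _ _
  unfold Spec_split_durations_by_long_idle split_durations_by_long_idle split_durations_by_long_idle_alt
  have hfun : (fun (st : List (List (Int × Int)) × List (Int × Int)) (ld : Int × Int) =>
      if ld.2 ≥ threshold_bits * Int.tdiv 1000000 baud then
        if st.2 ≠ [] then (st.1 ++ [st.2], []) else st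
      else
        (st.1, st.2 ++ [(ld.1, ld.2)])) = pvFA (threshold_bits * Int.tdiv 1000000 baud) := rfl
  simp only [hfun]
  rw [pvFoldA_eq (threshold_bits * Int.tdiv 1000000 baud) durations [] []]
  have h0 : durations.drop 0 = durations := by simp
  rw [pvAltLoop_eq durations (threshold_bits * Int.tdiv 1000000 baud) durations.length 0 [] (by omega), h0]
  simp [pvChunksP]
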